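-- pv_equiv track=rewrite | github.com/aos/advent | 2018/day02/01.py | count
-- ===== SOURCE A (Python) =====
-- import collections
--
-- def count(string):
--     counter = collections.Counter(string)
--     two = 0
--     three = 0
--
--     for _, value in counter.items():
--
--         if two and three:
--             break
--
--         if value == 2:
--             two = 1
--         if value == 3:
--             three = 1
--
--     return two, three
-- ===== SOURCE B (Python) =====
-- def count(string):
--     s = list(string)
--     distinct = set(s)
--     return (int(any(s.count(c) == 2 for c in distinct)),
--             int(any(s.count(c) == 3 for c in distinct)))
-- ===== Notes on version B (the rewrite author's own statement) =====
-- stated objective: alternative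
-- what changed: Drops the Counter and the flag loop altogether: B recounts each distinct character directly with list.count and answers with two any() membership queries, so no frequency table or mutable flags are ever built.
import Mathlib
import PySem

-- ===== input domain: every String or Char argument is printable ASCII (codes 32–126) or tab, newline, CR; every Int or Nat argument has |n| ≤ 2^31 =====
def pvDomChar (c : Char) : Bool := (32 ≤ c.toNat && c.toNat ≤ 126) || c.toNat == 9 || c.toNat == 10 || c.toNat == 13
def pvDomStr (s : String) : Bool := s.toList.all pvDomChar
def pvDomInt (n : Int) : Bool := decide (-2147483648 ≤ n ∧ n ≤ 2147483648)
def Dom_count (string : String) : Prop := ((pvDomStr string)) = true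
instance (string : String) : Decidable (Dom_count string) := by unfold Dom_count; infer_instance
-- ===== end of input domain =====

-- B builds no frequency table: it recounts each distinct character with list.count and
-- answers with two any() queries, replacing A's Counter plus flag loop (objective: alternative).

-- ===== PORT A =====
-- the 'for _, value in counter.items(): …' loop with its early break and the two/three flags
def countLoopA : List (Char × Int) → Int → Int → Int × Int
  | [], two, three => (two, three)
  | (_, value) :: rest, two, three =>
    if two ≠ 0 ∧ three ≠ 0 then (two, three)          -- 'if two and three: break'
    else countLoopA rest (if value = 2 then 1 else two) (if value = 3 then 1 else three)

def count (string : String) : Int × Int :=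
  let counter := PySem.Dict.counter string.toList     -- collections.Counter(string)
  countLoopA counter.items 0 0

-- ===== PORT B =====
def count_alt (string : String) : Int × Int :=
  let s := string.toList                              -- list(string)
  let distinct : PySem.Set Char := PySem.Set.ofList s -- set(s)
  ((if distinct.any (fun c => s.count c == 2) then 1 else 0),   -- int(any(s.count(c) == 2 …))
   (if distinct.any (fun c => s.count c == 3) then 1 else 0))   -- int(any(s.count(c) == 3 …))

-- ===== PRECONDITION & SPEC =====
def Spec_count (string : String) (out : Int × Int) : Prop := out = count_alt string
instance (string : String) (out : Int × Int) : Decidable (Spec_count string out) := by unfold Spec_count; infer_instance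

-- ===== CLAIM (what is proved, stated in full; the proofs are below) =====
def Claim_equal_count : Prop := ∀ (string : String), Dom_count string → Spec_count string (count string)

-- ===== LEMMAS AND PROOFS =====
lemma countLoopA_spec (vs : List (Char × Int)) : ∀ (a b : Int), (a = 0 ∨ a = 1) → (b = 0 ∨ b = 1) →
    countLoopA vs a b =
      ((if a = 1 ∨ (2 : Int) ∈ vs.map Prod.snd then 1 else 0),
       (if b = 1 ∨ (3 : Int) ∈ vs.map Prod.snd then 1 else 0)) := by
  induction vs with
  | nil =>
    intro a b ha hb
    simp only [countLoopA, List.map_nil, List.not_mem_nil, or_false]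
    rcases ha with ha | ha <;> rcases hb with hb | hb <;> subst ha <;> subst hb <;> norm_num
  | cons p rest ih =>
    intro a b ha hb
    obtain ⟨c, v⟩ := p
    by_cases hbr : a ≠ 0 ∧ b ≠ 0
    · have ha1 : a = 1 := by rcases ha with h | h <;> omega
      have hb1 : b = 1 := by rcases hb with h | h <;> omega
      subst ha1; subst hb1
      simp [countLoopA]
    · rw [show countLoopA ((c, v) :: rest) a b
          = countLoopA rest (if v = 2 then 1 else a) (if v = 3 then 1 else b) by
        simp only [countLoopA, if_neg hbr]]
      rw [ih (if v = 2 then 1 else a) (if v = 3 then 1 else b)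
        (by split_ifs <;> simp [ha]) (by split_ifs <;> simp [hb])]
      simp only [List.map_cons, List.mem_cons]
      have h2 : ((if v = 2 then (1:Int) else a) = 1 ∨ (2:Int) ∈ rest.map Prod.snd)
          ↔ (a = 1 ∨ 2 = v ∨ (2:Int) ∈ rest.map Prod.snd) := by
        by_cases h : v = 2
        · subst h; simp
        · simp [h, Ne.symm h]
      have h3 : ((if v = 3 then (1:Int) else b) = 1 ∨ (3:Int) ∈ rest.map Prod.snd)
          ↔ (b = 1 ∨ 3 = v ∨ (3:Int) ∈ rest.map Prod.snd) := by
        by_cases h : v = 3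
        · subst h; simp
        · simp [h, Ne.symm h]
      simp only [Prod.mk.injEq]
      exact ⟨if_congr h2 rfl rfl, if_congr h3 rfl rfl⟩

-- '2 ∈ Counter(s).values()' ↔ 'some distinct char counts to 2' — bridges A's items loop to B's any()
lemma mem_counts_iff (s : List Char) (m : Nat) :
    ((m : Int) ∈ (PySem.Dict.counter s).items.map Prod.snd)
      ↔ (PySem.Set.ofList s).any (fun c => s.count c == m) = true := by
  rw [PySem.Dict.items_counter, List.map_map, List.any_eq_true]
  constructor
  · intro hm
    rcases List.mem_map.mp hm with ⟨c, hc, h⟩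
    refine ⟨c, hc, ?_⟩
    have hcount : s.count c = m := by simpa using h
    simp [hcount]
  · rintro ⟨c, hc, h⟩
    refine List.mem_map.mpr ⟨c, hc, ?_⟩
    have hcount : s.count c = m := by simpa using h
    simp [Function.comp, hcount]

theorem count_eq (string : String) : count string = count_alt string := by
  unfold count count_alt
  rw [countLoopA_spec _ 0 0 (Or.inl rfl) (Or.inl rfl)]
  have h2 := (or_iff_right (by norm_num : ¬ (0:Int) = 1)).trans (mem_counts_iff string.toList 2)
  have h3 := (or_iff_right (by norm_num : ¬ (0:Int) = 1)).trans (mem_counts_iff string.toList 3)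
  exact Prod.ext (if_congr h2 rfl rfl) (if_congr h3 rfl rfl)

-- ===== VERDICT (by name: the statement is the Claim_ definition above) =====
theorem count_spec : Claim_equal_count := by
  intro s _
  unfold Spec_count
  exact count_eq s
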